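-- pv_equiv track=rewrite | github.com/jakedsmith1023/PythonForBusinessAnalysis | sunFoodMarketingRoi.py | getMarketingStats
-- ===== SOURCE A (Python) =====
-- BABY_CUSTOMER_ACQUISITION_RATES = [0.4, 0.5, 0.5, 0.6, 0.8, 0.8, 0.5]
--
-- BABY_CUSTOMER_ATTRITION_RATES = [0, 0.08, 0.08, 0.08, 0.04, 0.04, 0.04, 0.04, 0.02, 0.02, 0.02, 0.02]
--
-- def getMarketingStats(baseCustomerCount, expectedMonthlySpend):
--     totalMonthlyRevenue = []
--     totalMonthlyCustomers = []
--     for monthOffset, customerAcquisitionRate in enumerate(BABY_CUSTOMER_ACQUISITION_RATES):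
--         newCustomers = round(baseCustomerCount * customerAcquisitionRate)
--         for month in range(12):
--             currentMonth = monthOffset + month
--             monthlyRevenue = newCustomers * expectedMonthlySpend
--             try:
--                 totalMonthlyRevenue[currentMonth] += monthlyRevenue
--             except IndexError:
--                 totalMonthlyRevenue.append(monthlyRevenue)
--
--             attritionRate = BABY_CUSTOMER_ATTRITION_RATES[month]
--             newCustomers = round(newCustomers * (1 - attritionRate))
--             try:
--                 totalMonthlyCustomers[currentMonth] += newCustomers
--             except IndexError:
--                 totalMonthlyCustomers.append(newCustomers)
--
--     return totalMonthlyRevenue, totalMonthlyCustomers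
-- ===== SOURCE B (Python) =====
-- BABY_CUSTOMER_ACQUISITION_RATES = [0.4, 0.5, 0.5, 0.6, 0.8, 0.8, 0.5]
--
-- BABY_CUSTOMER_ATTRITION_RATES = [0, 0.08, 0.08, 0.08, 0.04, 0.04, 0.04, 0.04, 0.02, 0.02, 0.02, 0.02]
--
--
-- def _decay(count, rates):
--     """Recursive 12-month cohort table: [(pre-attrition count, post-attrition count), ...]."""
--     if not rates:
--         return []
--     nxt = round(count * (1 - rates[0]))
--     return [(count, nxt)] + _decay(nxt, rates[1:])
--
--
-- def getMarketingStats(baseCustomerCount, expectedMonthlySpend):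
--     # month-major gather: build each output month by summing the cohorts active that month
--     cohorts = [_decay(round(baseCustomerCount * rate), BABY_CUSTOMER_ATTRITION_RATES)
--                for rate in BABY_CUSTOMER_ACQUISITION_RATES]
--     months = len(BABY_CUSTOMER_ACQUISITION_RATES) - 1 + len(BABY_CUSTOMER_ATTRITION_RATES)
--     totalMonthlyRevenue = [
--         sum(cohorts[o][m - o][0] * expectedMonthlySpend
--             for o in range(len(cohorts)) if 0 <= m - o < len(BABY_CUSTOMER_ATTRITION_RATES))
--         for m in range(months)]
--     totalMonthlyCustomers = [
--         sum(cohorts[o][m - o][1]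
--             for o in range(len(cohorts)) if 0 <= m - o < len(BABY_CUSTOMER_ATTRITION_RATES))
--         for m in range(months)]
--     return totalMonthlyRevenue, totalMonthlyCustomers
-- ===== Notes on version B (the rewrite author's own statement) =====
-- stated objective: alternative
-- what changed: B inverts the traversal: it builds each cohort's 12-month (pre, post) table by a recursive pure function, then constructs the two 18-month outputs month-major, each month a comprehension summing the table entries of the cohorts active that month, instead of A's cohort-major in-place scatter with try-index/except-append growth.
import Mathlib
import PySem

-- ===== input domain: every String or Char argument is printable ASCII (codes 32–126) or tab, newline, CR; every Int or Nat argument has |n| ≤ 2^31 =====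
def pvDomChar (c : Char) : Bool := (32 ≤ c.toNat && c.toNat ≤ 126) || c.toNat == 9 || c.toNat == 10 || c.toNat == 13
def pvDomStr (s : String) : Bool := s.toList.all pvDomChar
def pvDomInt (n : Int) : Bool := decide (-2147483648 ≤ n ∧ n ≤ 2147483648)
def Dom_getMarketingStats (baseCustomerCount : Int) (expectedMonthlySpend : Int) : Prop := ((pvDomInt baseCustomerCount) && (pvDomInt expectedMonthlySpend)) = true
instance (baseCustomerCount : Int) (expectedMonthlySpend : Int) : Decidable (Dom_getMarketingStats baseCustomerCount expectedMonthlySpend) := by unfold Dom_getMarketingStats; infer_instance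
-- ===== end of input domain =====

-- B replaces A's cohort-major in-place scatter (try-index/except-append) by recursive
-- per-cohort tables and a month-major gather of the cohorts active each month (objective: alternative).

-- ---- shared exact model of Python float rounding (used by both ports) ----
-- round-half-even of a/m for m a positive power of two (exact Python banker's rounding)
def pyHalfEvenDiv (a : Int) (m : Int) : Int :=
  let q := Int.fdiv a m
  let r := a - q * m
  if 2*r < m then q else if 2*r > m then q + 1 else if q % 2 = 0 then q else q + 1

-- Exact model of Python's round(n * c) where n is an int with |n| ≤ 2^33 and c a double
-- whose exact value is num/2^exp: form the exact product, round it to the nearest double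
-- (ties to even), then apply round()'s half-even rounding.  Exact on the stated domain.
def pyRoundMulC (n : Int) (num : Int) (exp : Nat) : Int :=
  let p := n * num
  let p' := if p = 0 then p
    else
      let b := p.natAbs.log2
      if b ≤ 52 then p else pyHalfEvenDiv p (2^(b-52)) * 2^(b-52)
  pyHalfEvenDiv p' (2^exp)

-- the module constants, as the exact dyadic values (num, exp) of the doubles Python uses:
-- BABY_CUSTOMER_ACQUISITION_RATES = [0.4, 0.5, 0.5, 0.6, 0.8, 0.8, 0.5]
def pvAcqRates : List (Int × Nat) :=
  [(3602879701896397, 53), (1, 1), (1, 1), (5404319552844595, 53),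
   (3602879701896397, 52), (3602879701896397, 52), (1, 1)]
-- the doubles (1 - r) for r in BABY_CUSTOMER_ATTRITION_RATES = [0, .08, .08, .08, .04, .04, .04, .04, .02, .02, .02, .02]
def pvOneMinusAtt : List (Int × Nat) :=
  [(1, 0), (8286623314361713, 53), (8286623314361713, 53), (8286623314361713, 53),
   (1080863910568919, 50), (1080863910568919, 50), (1080863910568919, 50), (1080863910568919, 50),
   (2206763817411543, 51), (2206763817411543, 51), (2206763817411543, 51), (2206763817411543, 51)]

-- enumerate(xs): index/value pairs
def pvEnum {A : Type} : Nat -> List A -> List (Nat × A)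
  | _, [] => []
  | i, x :: xs => (i, x) :: pvEnum (i+1) xs

-- ===== PORT A =====
-- 'try: xs[i] += v  except IndexError: xs.append(v)'
def pvAddAt (xs : List Int) (i : Nat) (v : Int) : List Int :=
  if h : i < xs.length then xs.set i (xs[i] + v) else xs ++ [v]

def getMarketingStats (baseCustomerCount : Int) (expectedMonthlySpend : Int) : List Int × List Int :=
  (pvEnum 0 pvAcqRates).foldl
    (fun (acc : List Int × List Int) me =>
      let monthOffset := me.1
      let rate := me.2
      let st := (List.range 12).foldl
        (fun (st : List Int × List Int × Int) month =>
          let rev := st.1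
          let cust := st.2.1
          let newCustomers := st.2.2
          let currentMonth := monthOffset + month
          let monthlyRevenue := newCustomers * expectedMonthlySpend
          let rev := pvAddAt rev currentMonth monthlyRevenue
          let ar := pvOneMinusAtt.getD month (0, 0)
          let newCustomers := pyRoundMulC newCustomers ar.1 ar.2
          let cust := pvAddAt cust currentMonth newCustomers
          (rev, cust, newCustomers))
        (acc.1, acc.2, pyRoundMulC baseCustomerCount rate.1 rate.2)
      (st.1, st.2.1))
    ([], [])

-- ===== PORT B =====
-- _decay: recursive 12-month cohort table [(pre-attrition count, post-attrition count), ...]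
def pvDecay (c : Int) : List (Int × Nat) → List (Int × Int)
  | [] => []
  | r :: rs => (c, pyRoundMulC c r.1 r.2) :: pvDecay (pyRoundMulC c r.1 r.2) rs

def getMarketingStats_alt (baseCustomerCount : Int) (expectedMonthlySpend : Int) : List Int × List Int :=
  -- month-major gather: build each output month by summing the cohorts active that month
  let cohorts := pvAcqRates.map (fun rate => pvDecay (pyRoundMulC baseCustomerCount rate.1 rate.2) pvOneMinusAtt)
  let months := pvAcqRates.length - 1 + pvOneMinusAtt.length
  -- Python's '0 <= m - o < 12' over ints is 'o ≤ m ∧ m - o < 12' over these Nats (exact)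
  let active := fun (m o : Nat) => decide (o ≤ m) && decide (m - o < pvOneMinusAtt.length)
  let totalMonthlyRevenue := (List.range months).map (fun m =>
    (((List.range cohorts.length).filter (active m)).map
      (fun o => ((cohorts.getD o []).getD (m - o) (0, 0)).1 * expectedMonthlySpend)).sum)
  let totalMonthlyCustomers := (List.range months).map (fun m =>
    (((List.range cohorts.length).filter (active m)).map
      (fun o => ((cohorts.getD o []).getD (m - o) (0, 0)).2)).sum)
  (totalMonthlyRevenue, totalMonthlyCustomers)

-- ===== PRECONDITION & SPEC =====
def Spec_getMarketingStats (baseCustomerCount : Int) (expectedMonthlySpend : Int) (out : List Int × List Int) : Prop := out = getMarketingStats_alt baseCustomerCount expectedMonthlySpend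
instance (baseCustomerCount : Int) (expectedMonthlySpend : Int) (out : List Int × List Int) : Decidable (Spec_getMarketingStats baseCustomerCount expectedMonthlySpend out) := by unfold Spec_getMarketingStats; infer_instance

-- ===== CLAIM (what is proved, stated in full; the proofs are below) =====
def Claim_equal_getMarketingStats : Prop := ∀ (baseCustomerCount : Int) (expectedMonthlySpend : Int), Dom_getMarketingStats baseCustomerCount expectedMonthlySpend → Spec_getMarketingStats baseCustomerCount expectedMonthlySpend (getMarketingStats baseCustomerCount expectedMonthlySpend)

-- ===== LEMMAS AND PROOFS =====

-- per-cohort table of (monthly revenue, post-attrition count): A's inner loop values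
def pvSeries (s : Int) : List (Int × Nat) → Int → List (Int × Int)
  | [], _ => []
  | ar :: L, c => (c * s, pyRoundMulC c ar.1 ar.2) :: pvSeries s L (pyRoundMulC c ar.1 ar.2)

-- in-bounds 'tot[i] += v' (proof-side scatter primitive)
def pvBump (tot : List Int) (i : Nat) (v : Int) : List Int := tot.set i (tot.getD i 0 + v)

theorem pv_addAt_length (xs : List Int) (i : Nat) (v : Int) (h : i ≤ xs.length) :
    (pvAddAt xs i v).length = max xs.length (i + 1) := by
  unfold pvAddAt
  split_ifs with h1
  · simp; omega
  · simp; omega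

theorem pv_bump_pad (xs : List Int) (i : Nat) (v : Int) (h : i ≤ xs.length) (h18 : i < 18) :
    pvBump (xs ++ List.replicate (18 - xs.length) 0) i v
      = pvAddAt xs i v ++ List.replicate (18 - (pvAddAt xs i v).length) 0 := by
  unfold pvBump pvAddAt
  split_ifs with h1
  · rw [List.getD_append _ _ _ _ h1, List.set_append, if_pos h1,
      List.getD_eq_getElem _ _ h1, List.length_set]
  · have hi : i = xs.length := by omega
    subst hi
    have h2 : 18 - xs.length = (18 - (xs.length + 1)) + 1 := by omega
    rw [h2, List.replicate_succ, List.set_append, if_neg (by omega)]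
    have h3 : (xs ++ [v]).length = xs.length + 1 := by simp
    rw [h3]
    have h4 : (xs ++ (0 : Int) :: List.replicate (18 - (xs.length + 1)) 0).getD xs.length 0 = 0 := by
      rw [List.getD_append_right _ _ _ _ (le_refl _)]
      simp
    rw [h4]
    simp [List.append_assoc]

theorem pv_cohort (s : Int) :
    ∀ (L : List (Int × Nat)) (j : Nat) (c : Int) (ra ca : List Int),
    ra.length = ca.length → j ≤ ra.length → j + L.length ≤ 18 →
    (let FA := (pvEnum j L).foldl
        (fun (st : List Int × List Int × Int) (p : Nat × (Int × Nat)) =>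
          (pvAddAt st.1 p.1 (st.2.2 * s),
           pvAddAt st.2.1 p.1 (pyRoundMulC st.2.2 p.2.1 p.2.2),
           pyRoundMulC st.2.2 p.2.1 p.2.2)) (ra, ca, c)
     (pvEnum j (pvSeries s L c)).foldl
        (fun (a : List Int × List Int) (mc : Nat × (Int × Int)) =>
          (pvBump a.1 mc.1 mc.2.1, pvBump a.2 mc.1 mc.2.2))
        (ra ++ List.replicate (18 - ra.length) 0, ca ++ List.replicate (18 - ca.length) 0)
      = (FA.1 ++ List.replicate (18 - FA.1.length) 0,
         FA.2.1 ++ List.replicate (18 - FA.2.1.length) 0)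
      ∧ FA.1.length = max ra.length (j + L.length)
      ∧ FA.2.1.length = max ca.length (j + L.length)) := by
  intro L
  induction L with
  | nil =>
    intro j c ra ca hlen hj _
    refine ⟨rfl, ?_, ?_⟩ <;> simp [pvEnum] <;> omega
  | cons ar L ih =>
    intro j c ra ca hlen hj hle
    simp only [pvSeries, pvEnum, List.foldl_cons]
    have hj18 : j < 18 := by simp at hle; omega
    have hra := pv_addAt_length ra j (c * s) hj
    have hca := pv_addAt_length ca j (pyRoundMulC c ar.1 ar.2) (by omega)
    rw [pv_bump_pad ra j (c * s) hj hj18, pv_bump_pad ca j (pyRoundMulC c ar.1 ar.2) (by omega) hj18]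
    have hIH := ih (j + 1) (pyRoundMulC c ar.1 ar.2)
      (pvAddAt ra j (c * s)) (pvAddAt ca j (pyRoundMulC c ar.1 ar.2))
      (by rw [hra, hca]; omega) (by rw [hra]; omega)
      (by simp at hle ⊢; omega)
    simp only [] at hIH ⊢
    refine ⟨hIH.1, ?_, ?_⟩
    · rw [hIH.2.1, hra]; simp; omega
    · rw [hIH.2.2, hca]; simp; omega

theorem pv_main (n s : Int) :
    ∀ (R : List (Int × Nat)) (k : Nat) (ra ca : List Int),
    ra.length = ca.length → k ≤ ra.length → ra.length ≤ k + 11 → k + R.length ≤ 7 →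
    (let FA := (pvEnum k R).foldl
        (fun (acc : List Int × List Int) (me : Nat × (Int × Nat)) =>
          let st := (pvEnum me.1 pvOneMinusAtt).foldl
            (fun (st : List Int × List Int × Int) (p : Nat × (Int × Nat)) =>
              (pvAddAt st.1 p.1 (st.2.2 * s),
               pvAddAt st.2.1 p.1 (pyRoundMulC st.2.2 p.2.1 p.2.2),
               pyRoundMulC st.2.2 p.2.1 p.2.2))
            (acc.1, acc.2, pyRoundMulC n me.2.1 me.2.2)
          (st.1, st.2.1)) (ra, ca)
     (pvEnum k R).foldl
        (fun (acc : List Int × List Int) (me : Nat × (Int × Nat)) =>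
          (pvEnum me.1 (pvSeries s pvOneMinusAtt (pyRoundMulC n me.2.1 me.2.2))).foldl
            (fun (a : List Int × List Int) (mc : Nat × (Int × Int)) =>
              (pvBump a.1 mc.1 mc.2.1, pvBump a.2 mc.1 mc.2.2)) acc)
        (ra ++ List.replicate (18 - ra.length) 0, ca ++ List.replicate (18 - ca.length) 0)
      = (FA.1 ++ List.replicate (18 - FA.1.length) 0,
         FA.2 ++ List.replicate (18 - FA.2.length) 0)
      ∧ (R ≠ [] → FA.1.length = k + R.length + 11 ∧ FA.2.length = k + R.length + 11)) := by
  intro R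
  induction R with
  | nil =>
    intro k ra ca hlen hk hub hR
    exact ⟨rfl, fun h => absurd rfl h⟩
  | cons r R ih =>
    intro k ra ca hlen hk hub hR
    simp only [pvEnum, List.foldl_cons]
    have hc := pv_cohort s pvOneMinusAtt k (pyRoundMulC n r.1 r.2) ra ca hlen hk
      (by show k + 12 ≤ 18; simp at hR; omega)
    simp only [] at hc
    obtain ⟨hB, hl1, hl2⟩ := hc
    have h12 : pvOneMinusAtt.length = 12 := rfl
    rw [h12] at hl1 hl2
    rw [hB]
    set st := (pvEnum k pvOneMinusAtt).foldl
      (fun (st : List Int × List Int × Int) (p : Nat × (Int × Nat)) =>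
        (pvAddAt st.1 p.1 (st.2.2 * s),
         pvAddAt st.2.1 p.1 (pyRoundMulC st.2.2 p.2.1 p.2.2),
         pyRoundMulC st.2.2 p.2.1 p.2.2))
      (ra, ca, pyRoundMulC n r.1 r.2) with hst
    have hIH := ih (k + 1) st.1 st.2.1
      (by rw [hl1, hl2, hlen]) (by rw [hl1]; omega) (by rw [hl1]; omega)
      (by simp at hR ⊢; omega)
    simp only [] at hIH ⊢
    refine ⟨hIH.1, fun _ => ?_⟩
    rcases R with _ | ⟨r2, R⟩
    · constructor <;> simp [pvEnum, hl1, hl2] <;> omega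
    · have := hIH.2 (by simp)
      constructor <;> [rw [this.1]; rw [this.2]] <;> simp <;> omega


-- ---- elementwise characterisation of the scatter fold, and the gather bridge ----

-- the pair-scatter of one cohort's series at offset o (the inner fold of pv_main's LHS)
def pvScat (L : List (Int × Int)) (o : Nat) (t : List Int × List Int) : List Int × List Int :=
  (pvEnum o L).foldl
    (fun (a : List Int × List Int) (mc : Nat × (Int × Int)) =>
      (pvBump a.1 mc.1 mc.2.1, pvBump a.2 mc.1 mc.2.2)) t

theorem pv_getD_set (t : List Int) (i m : Nat) (x : Int) (hi : i < t.length) :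
    (t.set i x).getD m 0 = if m = i then x else t.getD m 0 := by
  rcases Nat.lt_or_ge m t.length with hm | hm
  · rw [List.getD_eq_getElem _ _ (by simpa using hm), List.getD_eq_getElem _ _ hm,
      List.getElem_set]
    split_ifs with h1 h2 h2 <;> first | rfl | omega
  · rw [List.getD_eq_default _ _ (by simpa using hm), List.getD_eq_default _ _ hm,
      if_neg (by omega)]

theorem pv_bump_getD (t : List Int) (i m : Nat) (v : Int) (hi : i < t.length) :
    (pvBump t i v).getD m 0 = if m = i then t.getD i 0 + v else t.getD m 0 :=
  pv_getD_set t i m _ hi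

theorem pv_scat_spec :
    ∀ (L : List (Int × Int)) (o : Nat) (t : List Int × List Int),
    o + L.length ≤ t.1.length → o + L.length ≤ t.2.length →
    (pvScat L o t).1.length = t.1.length ∧ (pvScat L o t).2.length = t.2.length ∧
    ∀ m : Nat,
      (pvScat L o t).1.getD m 0
        = t.1.getD m 0 + (if o ≤ m ∧ m < o + L.length then (L.getD (m - o) (0, 0)).1 else 0)
      ∧ (pvScat L o t).2.getD m 0
        = t.2.getD m 0 + (if o ≤ m ∧ m < o + L.length then (L.getD (m - o) (0, 0)).2 else 0) := by
  intro L
  induction L with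
  | nil =>
    intro o t _ _
    refine ⟨rfl, rfl, fun m => ?_⟩
    simp [pvScat, pvEnum]
  | cons x L ih =>
    intro o t h1 h2
    have ho1 : o < t.1.length := by simp at h1; omega
    have ho2 : o < t.2.length := by simp at h2; omega
    have hstep : pvScat (x :: L) o t
        = pvScat L (o + 1) (pvBump t.1 o x.1, pvBump t.2 o x.2) := by
      simp [pvScat, pvEnum]
    have hb1 : (pvBump t.1 o x.1).length = t.1.length := by simp [pvBump]
    have hb2 : (pvBump t.2 o x.2).length = t.2.length := by simp [pvBump]
    have hIH := ih (o + 1) (pvBump t.1 o x.1, pvBump t.2 o x.2)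
      (by simp only [hb1]; simp at h1 ⊢; omega) (by simp only [hb2]; simp at h2 ⊢; omega)
    obtain ⟨hL1, hL2, hm⟩ := hIH
    rw [hstep]
    refine ⟨by rw [hL1, hb1], by rw [hL2, hb2], fun m => ?_⟩
    obtain ⟨hm1, hm2⟩ := hm m
    rw [hm1, hm2, pv_bump_getD t.1 o m x.1 ho1, pv_bump_getD t.2 o m x.2 ho2]
    simp only [List.length_cons]
    by_cases hmo : m = o
    · subst hmo
      rw [if_pos rfl, if_pos rfl, if_neg (show ¬(m + 1 ≤ m ∧ m < m + 1 + L.length) by omega),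
        if_neg (show ¬(m + 1 ≤ m ∧ m < m + 1 + L.length) by omega),
        if_pos (show m ≤ m ∧ m < m + (L.length + 1) by omega),
        if_pos (show m ≤ m ∧ m < m + (L.length + 1) by omega)]
      simp
    · rw [if_neg hmo, if_neg hmo]
      by_cases hw : o + 1 ≤ m ∧ m < o + 1 + L.length
      · have hidx : m - o = (m - (o + 1)) + 1 := by omega
        rw [if_pos hw, if_pos hw, if_pos (show o ≤ m ∧ m < o + (L.length + 1) by omega),
          if_pos (show o ≤ m ∧ m < o + (L.length + 1) by omega), hidx, List.getD_cons_succ]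
        exact ⟨rfl, rfl⟩
      · rw [if_neg hw, if_neg hw, if_neg (show ¬(o ≤ m ∧ m < o + (L.length + 1)) by omega),
          if_neg (show ¬(o ≤ m ∧ m < o + (L.length + 1)) by omega)]
        exact ⟨rfl, rfl⟩

theorem pvSeries_length (s : Int) : ∀ (L : List (Int × Nat)) (c : Int),
    (pvSeries s L c).length = L.length := by
  intro L
  induction L with
  | nil => intro c; rfl
  | cons ar L ih => intro c; simp [pvSeries, ih]

-- the cohort-fold of scatters, elementwise: each month is the sum of the active cohorts
theorem pv_scatAll (n s : Int) :
    ∀ (R : List (Int × Nat)) (k : Nat) (t : List Int × List Int),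
    t.1.length = 18 → t.2.length = 18 → k + R.length ≤ 7 →
    (let F := (pvEnum k R).foldl
        (fun (acc : List Int × List Int) (me : Nat × (Int × Nat)) =>
          pvScat (pvSeries s pvOneMinusAtt (pyRoundMulC n me.2.1 me.2.2)) me.1 acc) t
     F.1.length = 18 ∧ F.2.length = 18 ∧
     ∀ m : Nat,
       F.1.getD m 0 = t.1.getD m 0
         + ((pvEnum k R).map (fun me => if me.1 ≤ m ∧ m < me.1 + 12 then
             ((pvSeries s pvOneMinusAtt (pyRoundMulC n me.2.1 me.2.2)).getD (m - me.1) (0, 0)).1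
             else 0)).sum
       ∧ F.2.getD m 0 = t.2.getD m 0
         + ((pvEnum k R).map (fun me => if me.1 ≤ m ∧ m < me.1 + 12 then
             ((pvSeries s pvOneMinusAtt (pyRoundMulC n me.2.1 me.2.2)).getD (m - me.1) (0, 0)).2
             else 0)).sum) := by
  intro R
  induction R with
  | nil =>
    intro k t ht1 ht2 _
    refine ⟨ht1, ht2, fun m => ?_⟩
    simp [pvEnum]
  | cons r R ih =>
    intro k t ht1 ht2 hk
    simp only [pvEnum, List.foldl_cons, List.map_cons, List.sum_cons]
    have h12 : (pvSeries s pvOneMinusAtt (pyRoundMulC n r.1 r.2)).length = 12 := by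
      rw [pvSeries_length]; rfl
    have hsc := pv_scat_spec (pvSeries s pvOneMinusAtt (pyRoundMulC n r.1 r.2)) k t
      (by rw [h12, ht1]; simp at hk; omega) (by rw [h12, ht2]; simp at hk; omega)
    obtain ⟨hs1, hs2, hsm⟩ := hsc
    have hIH := ih (k + 1) (pvScat (pvSeries s pvOneMinusAtt (pyRoundMulC n r.1 r.2)) k t)
      (by rw [hs1, ht1]) (by rw [hs2, ht2]) (by simp at hk ⊢; omega)
    simp only [] at hIH ⊢
    obtain ⟨hF1, hF2, hFm⟩ := hIH
    refine ⟨hF1, hF2, fun m => ?_⟩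
    obtain ⟨ha, hb⟩ := hFm m
    obtain ⟨hc, hd⟩ := hsm m
    rw [h12] at hc hd
    constructor
    · rw [ha, hc, add_assoc]
    · rw [hb, hd, add_assoc]

-- pvSeries is the (·*s, ·) image of B's pvDecay table
theorem pvSeries_eq_decay (s : Int) : ∀ (L : List (Int × Nat)) (c : Int),
    pvSeries s L c = (pvDecay c L).map (fun p => (p.1 * s, p.2)) := by
  intro L
  induction L with
  | nil => intro c; rfl
  | cons ar L ih => intro c; simp [pvSeries, pvDecay, ih]

theorem pvDecay_length : ∀ (L : List (Int × Nat)) (c : Int), (pvDecay c L).length = L.length := by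
  intro L
  induction L with
  | nil => intro c; rfl
  | cons ar L ih => intro c; simp [pvDecay, ih]

theorem pv_series_getD (s c : Int) (i : Nat) (hi : i < 12) :
    (pvSeries s pvOneMinusAtt c).getD i (0, 0)
      = (((pvDecay c pvOneMinusAtt).getD i (0, 0)).1 * s,
         ((pvDecay c pvOneMinusAtt).getD i (0, 0)).2) := by
  have hl : (pvDecay c pvOneMinusAtt).length = 12 := by rw [pvDecay_length]; rfl
  rw [pvSeries_eq_decay, List.getD_eq_getElem _ _ (by simp [hl]; omega),
    List.getD_eq_getElem _ _ (by rw [hl]; omega), List.getElem_map]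

-- sum over a filtered list = sum of the if-guarded terms
theorem pv_sum_filter (xs : List Nat) (p : Nat → Bool) (f : Nat → Int) :
    ((xs.filter p).map f).sum = (xs.map (fun x => if p x then f x else 0)).sum := by
  induction xs with
  | nil => rfl
  | cons x xs ih =>
    simp only [List.filter_cons, List.map_cons, List.sum_cons]
    by_cases h : p x
    · simp [h, ih]
    · simp [h, ih]

-- per-cohort term bridge: A-side windowed pvSeries term = B-side filtered pvDecay term
theorem pv_term1 (s c : Int) (o m : Nat) :
    (if o ≤ m ∧ m < o + 12 then ((pvSeries s pvOneMinusAtt c).getD (m - o) (0, 0)).1 else 0)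
      = (if (decide (o ≤ m) && decide (m - o < 12)) = true then
          ((pvDecay c pvOneMinusAtt).getD (m - o) (0, 0)).1 * s else 0) := by
  have hcond : ((decide (o ≤ m) && decide (m - o < 12)) = true) ↔ (o ≤ m ∧ m < o + 12) := by
    simp; omega
  simp only [hcond]
  split_ifs with h
  · rw [pv_series_getD s c (m - o) (by omega)]
  · rfl

theorem pv_term2 (s c : Int) (o m : Nat) :
    (if o ≤ m ∧ m < o + 12 then ((pvSeries s pvOneMinusAtt c).getD (m - o) (0, 0)).2 else 0)
      = (if (decide (o ≤ m) && decide (m - o < 12)) = true then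
          ((pvDecay c pvOneMinusAtt).getD (m - o) (0, 0)).2 else 0) := by
  have hcond : ((decide (o ≤ m) && decide (m - o < 12)) = true) ↔ (o ≤ m ∧ m < o + 12) := by
    simp; omega
  simp only [hcond]
  split_ifs with h
  · rw [pv_series_getD s c (m - o) (by omega)]
  · rfl

-- ===== VERDICT (by name: the statement is the Claim_ definition above) =====
set_option maxHeartbeats 2000000 in
set_option maxRecDepth 100000 in
theorem getMarketingStats_spec : Claim_equal_getMarketingStats := by
  intro n s _
  unfold Spec_getMarketingStats
  -- step 1: A equals the scatter fold S over zero-filled 18-month lists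
  have hm := pv_main n s pvAcqRates 0 [] [] rfl (by simp) (by simp) (by simp [pvAcqRates])
  simp only [] at hm
  obtain ⟨hB, hlen⟩ := hm
  obtain ⟨he1, he2⟩ := hlen (by simp [pvAcqRates])
  rw [show pvAcqRates.length = 7 from rfl] at he1 he2
  simp only [List.nil_append, List.length_nil, Nat.sub_zero] at hB
  have hA : getMarketingStats n s = (pvEnum 0 pvAcqRates).foldl
      (fun (acc : List Int × List Int) (me : Nat × (Int × Nat)) =>
        let st := (pvEnum me.1 pvOneMinusAtt).foldl
          (fun (st : List Int × List Int × Int) (p : Nat × (Int × Nat)) =>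
            (pvAddAt st.1 p.1 (st.2.2 * s),
             pvAddAt st.2.1 p.1 (pyRoundMulC st.2.2 p.2.1 p.2.2),
             pyRoundMulC st.2.2 p.2.1 p.2.2))
          (acc.1, acc.2, pyRoundMulC n me.2.1 me.2.2)
        (st.1, st.2.1)) ([], []) := by
    unfold getMarketingStats
    congr 1
  have hS : getMarketingStats n s = (pvEnum 0 pvAcqRates).foldl
      (fun (acc : List Int × List Int) (me : Nat × (Int × Nat)) =>
        pvScat (pvSeries s pvOneMinusAtt (pyRoundMulC n me.2.1 me.2.2)) me.1 acc)
      (List.replicate 18 0, List.replicate 18 0) := by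
    rw [hA]
    have := hB
    rw [he1, he2] at this
    simp only [Nat.sub_self, List.replicate_zero, List.append_nil] at this
    rw [Prod.mk.eta] at this
    simp only [pvScat]
    exact this.symm
  set S := (pvEnum 0 pvAcqRates).foldl
      (fun (acc : List Int × List Int) (me : Nat × (Int × Nat)) =>
        pvScat (pvSeries s pvOneMinusAtt (pyRoundMulC n me.2.1 me.2.2)) me.1 acc)
      (List.replicate 18 0, List.replicate 18 0) with hSdef
  -- step 2: elementwise description of S
  have hs := pv_scatAll n s pvAcqRates 0 (List.replicate 18 0, List.replicate 18 0)
    (by simp) (by simp) (by simp [pvAcqRates])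
  simp only [] at hs
  rw [← hSdef] at hs
  obtain ⟨hf1, hf2, hfm⟩ := hs
  -- step 3: B's gather, with the concrete lengths reduced
  have hAlt : getMarketingStats_alt n s =
      ((List.range 18).map (fun m =>
        (((List.range 7).filter (fun o => decide (o ≤ m) && decide (m - o < 12))).map
          (fun o => (((pvAcqRates.map (fun r => pvDecay (pyRoundMulC n r.1 r.2) pvOneMinusAtt)).getD o []).getD (m - o) (0, 0)).1 * s)).sum),
       (List.range 18).map (fun m =>
        (((List.range 7).filter (fun o => decide (o ≤ m) && decide (m - o < 12))).map
          (fun o => (((pvAcqRates.map (fun r => pvDecay (pyRoundMulC n r.1 r.2) pvOneMinusAtt)).getD o []).getD (m - o) (0, 0)).2)).sum)) := rfl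
  rw [hS, hAlt]
  have hE : pvEnum 0 pvAcqRates =
      [(0, ((3602879701896397 : Int), (53 : Nat))), (1, (1, 1)), (2, (1, 1)), (3, (5404319552844595, 53)),
       (4, (3602879701896397, 52)), (5, (3602879701896397, 52)), (6, (1, 1))] := rfl
  have hR7 : List.range 7 = [0, 1, 2, 3, 4, 5, 6] := rfl
  have hc : ∀ o : Nat, o < 7 →
      (pvAcqRates.map (fun r => pvDecay (pyRoundMulC n r.1 r.2) pvOneMinusAtt)).getD o []
        = pvDecay (pyRoundMulC n (pvAcqRates.getD o (0, 0)).1 (pvAcqRates.getD o (0, 0)).2) pvOneMinusAtt := by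
    intro o ho
    interval_cases o <;> rfl
  apply Prod.ext
  · apply List.ext_getElem (by rw [hf1]; simp)
    intro m hm1 hm2
    have hm18 : m < 18 := by rw [hf1] at hm1; exact hm1
    have hterm := (hfm m).1
    rw [List.getD_eq_getElem _ _ hm1] at hterm
    have hz : (List.replicate 18 (0 : Int)).getD m 0 = 0 := by
      rw [List.getD_eq_getElem _ _ (by simp; omega)]; apply List.getElem_replicate
    rw [hterm, hz, zero_add, List.getElem_map, List.getElem_range, pv_sum_filter,
      hE, hR7]
    simp only [List.map_cons, List.map_nil, List.sum_cons, List.sum_nil]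
    rw [hc 0 (by omega), hc 1 (by omega), hc 2 (by omega), hc 3 (by omega),
      hc 4 (by omega), hc 5 (by omega), hc 6 (by omega)]
    simp only [pv_term1]
    rfl
  · apply List.ext_getElem (by rw [hf2]; simp)
    intro m hm1 hm2
    have hm18 : m < 18 := by rw [hf2] at hm1; exact hm1
    have hterm := (hfm m).2
    rw [List.getD_eq_getElem _ _ hm1] at hterm
    have hz : (List.replicate 18 (0 : Int)).getD m 0 = 0 := by
      rw [List.getD_eq_getElem _ _ (by simp; omega)]; apply List.getElem_replicate
    rw [hterm, hz, zero_add, List.getElem_map, List.getElem_range, pv_sum_filter,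
      hE, hR7]
    simp only [List.map_cons, List.map_nil, List.sum_cons, List.sum_nil]
    rw [hc 0 (by omega), hc 1 (by omega), hc 2 (by omega), hc 3 (by omega),
      hc 4 (by omega), hc 5 (by omega), hc 6 (by omega)]
    simp only [pv_term2]
    rfl
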